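-- pv_equiv track=rewrite | github.com/vitalyruhl/ConfigurationsManager | tools/find_duplicate_strings.py | iter_string_literals
-- ===== SOURCE A (Python) =====
-- from typing import Iterable
--
-- def iter_string_literals(text: str) -> Iterable[str]:
--     """Yield string literals from C/C++ source using a simple state machine.
--
--     We avoid a full parser, but handle escaped quotes and multi-line literals.
--     """
--
--     literal = []
--     in_literal = False
--     escape = False
--
--     for char in text:
--         if in_literal:
--             if escape:
--                 literal.append(char)
--                 escape = False
--             elif char == "\\":
--                 literal.append(char)
--                 escape = True
--             elif char == "\"":
--                 yield "".join(literal)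
--                 literal.clear()
--                 in_literal = False
--             else:
--                 literal.append(char)
--         elif char == "\"":
--             in_literal = True
--         else:
--             continue
-- ===== SOURCE B (Python) =====
-- import re
-- from typing import Iterable
--
-- _STRING_LITERAL = re.compile(r'"((?:\\.|[^"\\])*)"', re.DOTALL)
--
-- def iter_string_literals(text: str) -> Iterable[str]:
--     """Yield string literals from C/C++ source by scanning with a regex."""
--     for match in _STRING_LITERAL.finditer(text):
--         yield match.group(1)
-- ===== Notes on version B (the rewrite author's own statement) =====
-- stated objective: idiomatic
-- what changed: Replaced the hand-written character-by-character state machine (in_literal/escape flags) with one compiled regex iterated via re.finditer; the capture group keeps backslashes verbatim and the required closing quote drops an unterminated trailing literal, matching A exactly.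
import Mathlib
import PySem

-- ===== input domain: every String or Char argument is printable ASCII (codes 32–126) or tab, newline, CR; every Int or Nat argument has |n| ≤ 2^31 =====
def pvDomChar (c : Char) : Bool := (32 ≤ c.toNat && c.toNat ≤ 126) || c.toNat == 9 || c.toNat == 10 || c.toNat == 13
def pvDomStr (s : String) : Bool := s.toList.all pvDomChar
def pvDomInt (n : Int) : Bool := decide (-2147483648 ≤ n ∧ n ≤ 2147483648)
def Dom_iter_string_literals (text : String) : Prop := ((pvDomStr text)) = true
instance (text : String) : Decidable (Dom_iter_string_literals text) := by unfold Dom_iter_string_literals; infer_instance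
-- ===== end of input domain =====

-- B replaces A's hand-written in_literal/escape state machine by a compiled-regex scan via
-- re.finditer (idiomatic; a timing run measured it faster by a constant factor). Both Python
-- versions are generators; the equivalence proved is about the sequence of yielded values.

-- ===== PORT A =====
-- state = (literal, in_literal, escape, values yielded so far); one step per character, branches in A's order
def stepA : List Char × Bool × Bool × List String → Char → List Char × Bool × Bool × List String
  | (lit, inLit, esc, acc), c =>
    if inLit then
      if esc then (lit ++ [c], inLit, false, acc)
      else if c = '\\' then (lit ++ [c], inLit, true, acc)
      else if c = '"' then ([], false, esc, acc ++ [String.ofList lit])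
      else (lit ++ [c], inLit, esc, acc)
    else if c = '"' then (lit, true, esc, acc)
    else (lit, inLit, esc, acc)

def iter_string_literals (text : String) : List String :=
  (text.toList.foldl stepA ([], false, false, [])).2.2.2

-- ===== PORT B =====
-- Hand port (exact) of Source B's regex with re.finditer: scanBody matches the
-- capture-group body (an escape pair `\\.` or any character other than `"`/`\`) up to the REQUIRED
-- closing quote (none = no match); scanTop is finditer: find the next match, emit its group,
-- continue scanning after it.
def scanBody : List Char → List Char → Option (String × List Char)
  | [], _ => none
  | c :: rest, lit =>
    if c = '"' then some (String.ofList lit, rest)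
    else if c = '\\' then
      match rest with
      | [] => none
      | d :: rest' => scanBody rest' (lit ++ [c, d])
    else scanBody rest (lit ++ [c])

-- a successful match consumes at least the closing quote (used for scanTop's termination)
theorem scanBody_length_lt : ∀ (cs lit : List Char) (s : String) (r : List Char),
    scanBody cs lit = some (s, r) → r.length < cs.length := by
  intro cs lit
  induction cs, lit using scanBody.induct with
  | case1 x => intro s r h; rw [scanBody.eq_def] at h; simp at h
  | case2 rest lit =>
    intro s r h; rw [scanBody.eq_def] at h; simp at h
    cases h.2; simp
  | case3 lit hne => intro s r h; rw [scanBody.eq_def] at h; simp at h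
  | case4 lit d rest' hne ih =>
    intro s r h
    rw [scanBody.eq_def] at h
    simp only [if_neg hne] at h
    have := ih s r h
    simp only [List.length_cons]; omega
  | case5 c rest lit hc hb ih =>
    intro s r h
    rw [scanBody.eq_def] at h
    simp only [if_neg hc, if_neg hb] at h
    have := ih s r h
    simp only [List.length_cons]; omega

def scanTop : List Char → List String
  | [] => []
  | c :: rest =>
    if c = '"' then
      match h : scanBody rest [] with
      | some (s, r) => s :: scanTop r
      | none => []
    else scanTop rest
termination_by cs => cs.length
decreasing_by
  · exact Nat.lt_succ_of_lt (scanBody_length_lt _ _ _ _ h)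
  · simp

def iter_string_literals_alt (text : String) : List String := scanTop text.toList

-- ===== PRECONDITION & SPEC =====
def Spec_iter_string_literals (text : String) (out : List String) : Prop := out = iter_string_literals_alt text
instance (text : String) (out : List String) : Decidable (Spec_iter_string_literals text out) := by unfold Spec_iter_string_literals; infer_instance

-- ===== CLAIM (what is proved, stated in full; the proofs are below) =====
def Claim_equal_iter_string_literals : Prop := ∀ (text : String), Dom_iter_string_literals text → Spec_iter_string_literals text (iter_string_literals text)

-- ===== LEMMAS AND PROOFS =====

-- the five reachable transitions of A's state machine
theorem stepA_open (lit : List Char) (esc : Bool) (acc : List String) :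
    stepA (lit, false, esc, acc) '"' = (lit, true, esc, acc) := by simp [stepA]

theorem stepA_skip (lit : List Char) (esc : Bool) (acc : List String) (c : Char) (hc : ¬ c = '"') :
    stepA (lit, false, esc, acc) c = (lit, false, esc, acc) := by simp [stepA, hc]

theorem stepA_esc (lit : List Char) (acc : List String) (c : Char) :
    stepA (lit, true, true, acc) c = (lit ++ [c], true, false, acc) := by simp [stepA]

theorem stepA_bs (lit : List Char) (acc : List String) :
    stepA (lit, true, false, acc) '\\' = (lit ++ ['\\'], true, true, acc) := by simp [stepA]

theorem stepA_close (lit : List Char) (acc : List String) :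
    stepA (lit, true, false, acc) '"' = ([], false, false, acc ++ [String.ofList lit]) := by
  simp [stepA]

theorem stepA_ch (lit : List Char) (acc : List String) (c : Char)
    (hq : ¬ c = '"') (hb : ¬ c = '\\') :
    stepA (lit, true, false, acc) c = (lit ++ [c], true, false, acc) := by simp [stepA, hq, hb]

-- the invariant: from "outside a literal" the fold yields scanTop; from "inside a literal,
-- no pending escape" it yields whatever scanBody's match contributes
theorem fold_both : ∀ (n : Nat) (cs : List Char), cs.length ≤ n →
    (∀ acc : List String, (List.foldl stepA ([], false, false, acc) cs).2.2.2 = acc ++ scanTop cs) ∧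
    (∀ (lit : List Char) (acc : List String),
      (List.foldl stepA (lit, true, false, acc) cs).2.2.2 =
        match scanBody cs lit with
        | some (s, r) => acc ++ s :: scanTop r
        | none => acc) := by
  intro n
  induction n with
  | zero =>
    intro cs h
    have hnil : cs = [] := List.eq_nil_of_length_eq_zero (Nat.le_zero.mp h)
    subst hnil
    exact ⟨fun acc => by simp [scanTop], fun lit acc => by rw [scanBody.eq_def]; simp⟩
  | succ n ih =>
    intro cs h
    match cs with
    | [] => exact ⟨fun acc => by simp [scanTop], fun lit acc => by rw [scanBody.eq_def]; simp⟩
    | c :: rest =>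
      have hr : rest.length ≤ n := by simp at h; omega
      constructor
      · intro acc
        by_cases hc : c = '"'
        · subst hc
          rw [List.foldl_cons, stepA_open, (ih rest hr).2 [] acc, scanTop]
          cases hsb : scanBody rest [] with
          | some p => cases p with | mk s r => simp
          | none => simp
        · rw [List.foldl_cons, stepA_skip _ _ _ _ hc, (ih rest hr).1 acc, scanTop, if_neg hc]
      · intro lit acc
        by_cases hq : c = '"'
        · subst hq
          rw [List.foldl_cons, stepA_close, (ih rest hr).1 (acc ++ [String.ofList lit]),
            scanBody.eq_def]
          simp
        · by_cases hb : c = '\\'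
          · subst hb
            match rest with
            | [] =>
              rw [List.foldl_cons, stepA_bs, List.foldl_nil, scanBody.eq_def]
              simp
            | d :: rest' =>
              have hr' : rest'.length ≤ n := by simp at h; omega
              rw [List.foldl_cons, stepA_bs, List.foldl_cons, stepA_esc,
                List.append_assoc]
              rw [show (['\\'] ++ [d] : List Char) = ['\\', d] by simp]
              rw [(ih rest' hr').2 (lit ++ ['\\', d]) acc]
              conv_rhs => rw [scanBody.eq_def]
              simp [hq]
          · rw [List.foldl_cons, stepA_ch _ _ _ hq hb,
              (ih rest hr).2 (lit ++ [c]) acc]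
            conv_rhs => rw [scanBody.eq_def]
            simp [hq, hb]

-- ===== VERDICT (by name: the statement is the Claim_ definition above) =====
theorem iter_string_literals_spec : Claim_equal_iter_string_literals := by
  intro text _
  unfold Spec_iter_string_literals iter_string_literals iter_string_literals_alt
  simpa using (fold_both text.toList.length text.toList le_rfl).1 []
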